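-- pv_equiv track=rewrite | github.com/insarlab/MintPy | src/mintpy/objects/sensor.py | standardize_sensor_name
-- ===== SOURCE A (Python) =====
-- SENSOR_NAME_VARIATION = {
--     'alos'  : ['alos', 'alos1', 'palsar', 'palsar1'],
--     'alos2' : ['alos2', 'palsar2'],
--     'alos4' : ['alos4', 'palsar3'],
--     'bio'   : ['bio', 'biomass'],
--     'csk'   : ['csk', 'csk1', 'csk2', 'csk3', 'csk4', 'cos', 'cosmo', 'cosmoskymed'],
--     'env'   : ['env', 'envisat', 'asar'],
--     'ers'   : ['ers', 'ers1', 'ers2', 'ers12'],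
--     'gf3'   : ['gfen3', 'gaofen3', 'g3', 'gaofen'],
--     'hj1c'  : ['hj1', 'huanjing1c'],
--     'jers'  : ['jers', 'jers1'],
--     'ksat5' : ['ksat5', 'kompsat5', 'kompsat', 'kmps5'],
--     'lt1'   : ['lt1', 'lt', 'lutan', 'lutan1'],
--     'ni'    : ['ni', 'nisar'],
--     'rs1'   : ['rs1', 'rsat', 'rsat1', 'radarsat', 'radarsat1'],
--     'rs2'   : ['rs2', 'rsat2', 'radarsat2'],
--     'rcm'   : ['rcm', 'rsatc', 'radarsat-constellation', 'radarsat-constellation-mission'],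
--     'sen'   : ['sen', 's1', 's1a', 's1b', 'sent1', 'sentinel1', 'sentinel1a', 'sentinel1b'],
--     'tsx'   : ['tsx', 'terra', 'terrasar', 'terrasarx', 'tdx', 'tandemx'],
--     'uav'   : ['uav', 'uavsar'],
-- }
--
-- SENSOR_NAMES = list(SENSOR_NAME_VARIATION.keys())
--
-- def standardize_sensor_name(sensor_name):
--     """"""
--     # decode if encoded
--     try:
--         sensor_name = sensor_name.decode()
--     except (UnicodeDecodeError, AttributeError):
--         pass
--
--     # remove -_ and user lower case before standardize sensor names
--     sensor_name = sensor_name.replace('-', '').replace('_', '').lower()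
--
--     if sensor_name in SENSOR_NAMES:
--         # if input name is already standardized, do nothing
--         pass
--     else:
--         # otherwise, check all the possible variations
--         for key, values in SENSOR_NAME_VARIATION.items():
--             if sensor_name in values:
--                 sensor_name = key
--             else:
--                 pass
--     return sensor_name
-- ===== SOURCE B (Python) =====
-- # Inverted alias -> canonical table of SENSOR_NAME_VARIATION (later keys win, each
-- # canonical key maps to itself), stored SORTED so the lookup is a binary search.
-- PAIRS = [
--     ('alos', 'alos'),
--     ('alos1', 'alos'),
--     ('alos2', 'alos2'),
--     ('alos4', 'alos4'),
--     ('asar', 'env'),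
--     ('bio', 'bio'),
--     ('biomass', 'bio'),
--     ('cos', 'csk'),
--     ('cosmo', 'csk'),
--     ('cosmoskymed', 'csk'),
--     ('csk', 'csk'),
--     ('csk1', 'csk'),
--     ('csk2', 'csk'),
--     ('csk3', 'csk'),
--     ('csk4', 'csk'),
--     ('env', 'env'),
--     ('envisat', 'env'),
--     ('ers', 'ers'),
--     ('ers1', 'ers'),
--     ('ers12', 'ers'),
--     ('ers2', 'ers'),
--     ('g3', 'gf3'),
--     ('gaofen', 'gf3'),
--     ('gaofen3', 'gf3'),
--     ('gf3', 'gf3'),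
--     ('gfen3', 'gf3'),
--     ('hj1', 'hj1c'),
--     ('hj1c', 'hj1c'),
--     ('huanjing1c', 'hj1c'),
--     ('jers', 'jers'),
--     ('jers1', 'jers'),
--     ('kmps5', 'ksat5'),
--     ('kompsat', 'ksat5'),
--     ('kompsat5', 'ksat5'),
--     ('ksat5', 'ksat5'),
--     ('lt', 'lt1'),
--     ('lt1', 'lt1'),
--     ('lutan', 'lt1'),
--     ('lutan1', 'lt1'),
--     ('ni', 'ni'),
--     ('nisar', 'ni'),
--     ('palsar', 'alos'),
--     ('palsar1', 'alos'),
--     ('palsar2', 'alos2'),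
--     ('palsar3', 'alos4'),
--     ('radarsat', 'rs1'),
--     ('radarsat-constellation', 'rcm'),
--     ('radarsat-constellation-mission', 'rcm'),
--     ('radarsat1', 'rs1'),
--     ('radarsat2', 'rs2'),
--     ('rcm', 'rcm'),
--     ('rs1', 'rs1'),
--     ('rs2', 'rs2'),
--     ('rsat', 'rs1'),
--     ('rsat1', 'rs1'),
--     ('rsat2', 'rs2'),
--     ('rsatc', 'rcm'),
--     ('s1', 'sen'),
--     ('s1a', 'sen'),
--     ('s1b', 'sen'),
--     ('sen', 'sen'),
--     ('sent1', 'sen'),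
--     ('sentinel1', 'sen'),
--     ('sentinel1a', 'sen'),
--     ('sentinel1b', 'sen'),
--     ('tandemx', 'tsx'),
--     ('tdx', 'tsx'),
--     ('terra', 'tsx'),
--     ('terrasar', 'tsx'),
--     ('terrasarx', 'tsx'),
--     ('tsx', 'tsx'),
--     ('uav', 'uav'),
--     ('uavsar', 'uav')
-- ]
-- ALIASES = [p[0] for p in PAIRS]
-- CANON = [p[1] for p in PAIRS]
--
-- def standardize_sensor_name(sensor_name):
--     """"""
--     # decode if encoded
--     try:
--         sensor_name = sensor_name.decode()
--     except (UnicodeDecodeError, AttributeError):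
--         pass
--     # remove -_ and use lower case before standardizing sensor names
--     sensor_name = sensor_name.replace('-', '').replace('_', '').lower()
--     # binary search (bisect_left) in the sorted alias table
--     lo, hi = 0, len(ALIASES)
--     while lo < hi:
--         mid = (lo + hi) // 2
--         if ALIASES[mid] < sensor_name:
--             lo = mid + 1
--         else:
--             hi = mid
--     if lo < len(ALIASES) and ALIASES[lo] == sensor_name:
--         return CANON[lo]
--     return sensor_name
-- ===== Notes on version B (the rewrite author's own statement) =====
-- stated objective: alternative
-- what changed: Replaces the canonical-name membership test plus the non-breaking scan over all 19 variation lists by a precomputed sorted alias->canonical table searched with a hand-written binary search (bisect_left), defaulting to the normalized name when absent.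
import Mathlib
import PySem

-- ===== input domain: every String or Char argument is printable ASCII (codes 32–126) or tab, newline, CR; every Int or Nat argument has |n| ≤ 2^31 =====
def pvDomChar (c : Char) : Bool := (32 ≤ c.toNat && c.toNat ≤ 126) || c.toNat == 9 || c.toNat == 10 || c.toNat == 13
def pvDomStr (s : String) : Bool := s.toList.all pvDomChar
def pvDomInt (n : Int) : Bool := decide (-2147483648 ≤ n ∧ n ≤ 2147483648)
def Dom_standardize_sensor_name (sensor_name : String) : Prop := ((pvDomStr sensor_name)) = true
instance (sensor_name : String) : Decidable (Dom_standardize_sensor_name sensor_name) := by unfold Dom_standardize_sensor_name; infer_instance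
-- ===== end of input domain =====

-- B replaces A's canonical-name membership test + non-breaking scan over all variation
-- lists by a precomputed sorted alias->canonical table searched by binary search
-- (objective: alternative; not claimed faster).
-- A's try/except .decode() is a no-op on str input (AttributeError -> pass), so neither port models it.

-- ===== PORT A =====
-- SENSOR_NAME_VARIATION as an insertion-ordered association list (module constant of A)
def pvVariation : List (String × List String) :=
  [ ("alos",  ["alos", "alos1", "palsar", "palsar1"]),
    ("alos2", ["alos2", "palsar2"]),
    ("alos4", ["alos4", "palsar3"]),
    ("bio",   ["bio", "biomass"]),
    ("csk",   ["csk", "csk1", "csk2", "csk3", "csk4", "cos", "cosmo", "cosmoskymed"]),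
    ("env",   ["env", "envisat", "asar"]),
    ("ers",   ["ers", "ers1", "ers2", "ers12"]),
    ("gf3",   ["gfen3", "gaofen3", "g3", "gaofen"]),
    ("hj1c",  ["hj1", "huanjing1c"]),
    ("jers",  ["jers", "jers1"]),
    ("ksat5", ["ksat5", "kompsat5", "kompsat", "kmps5"]),
    ("lt1",   ["lt1", "lt", "lutan", "lutan1"]),
    ("ni",    ["ni", "nisar"]),
    ("rs1",   ["rs1", "rsat", "rsat1", "radarsat", "radarsat1"]),
    ("rs2",   ["rs2", "rsat2", "radarsat2"]),
    ("rcm",   ["rcm", "rsatc", "radarsat-constellation", "radarsat-constellation-mission"]),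
    ("sen",   ["sen", "s1", "s1a", "s1b", "sent1", "sentinel1", "sentinel1a", "sentinel1b"]),
    ("tsx",   ["tsx", "terra", "terrasar", "terrasarx", "tdx", "tandemx"]),
    ("uav",   ["uav", "uavsar"]) ]

-- SENSOR_NAMES = list(SENSOR_NAME_VARIATION.keys())
def pvSensorNames : List String := pvVariation.map (·.1)

def standardize_sensor_name (sensor_name : String) : String :=
  -- sensor_name.replace('-','').replace('_','').lower()
  let n := PySem.Str.lower (PySem.Str.replace (PySem.Str.replace sensor_name "-" "") "_" "")
  if n ∈ pvSensorNames then
    n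
  else
    -- for key, values in SENSOR_NAME_VARIATION.items(): if sensor_name in values: sensor_name = key
    pvVariation.foldl (fun acc kv => if acc ∈ kv.2 then kv.1 else acc) n

-- ===== PORT B =====
-- Source B's module constant PAIRS: inverted alias -> canonical table, sorted by alias
def pvPairs : List (String × String) :=
  [ ("alos", "alos"),
    ("alos1", "alos"),
    ("alos2", "alos2"),
    ("alos4", "alos4"),
    ("asar", "env"),
    ("bio", "bio"),
    ("biomass", "bio"),
    ("cos", "csk"),
    ("cosmo", "csk"),
    ("cosmoskymed", "csk"),
    ("csk", "csk"),
    ("csk1", "csk"),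
    ("csk2", "csk"),
    ("csk3", "csk"),
    ("csk4", "csk"),
    ("env", "env"),
    ("envisat", "env"),
    ("ers", "ers"),
    ("ers1", "ers"),
    ("ers12", "ers"),
    ("ers2", "ers"),
    ("g3", "gf3"),
    ("gaofen", "gf3"),
    ("gaofen3", "gf3"),
    ("gf3", "gf3"),
    ("gfen3", "gf3"),
    ("hj1", "hj1c"),
    ("hj1c", "hj1c"),
    ("huanjing1c", "hj1c"),
    ("jers", "jers"),
    ("jers1", "jers"),
    ("kmps5", "ksat5"),
    ("kompsat", "ksat5"),
    ("kompsat5", "ksat5"),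
    ("ksat5", "ksat5"),
    ("lt", "lt1"),
    ("lt1", "lt1"),
    ("lutan", "lt1"),
    ("lutan1", "lt1"),
    ("ni", "ni"),
    ("nisar", "ni"),
    ("palsar", "alos"),
    ("palsar1", "alos"),
    ("palsar2", "alos2"),
    ("palsar3", "alos4"),
    ("radarsat", "rs1"),
    ("radarsat-constellation", "rcm"),
    ("radarsat-constellation-mission", "rcm"),
    ("radarsat1", "rs1"),
    ("radarsat2", "rs2"),
    ("rcm", "rcm"),
    ("rs1", "rs1"),
    ("rs2", "rs2"),
    ("rsat", "rs1"),
    ("rsat1", "rs1"),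
    ("rsat2", "rs2"),
    ("rsatc", "rcm"),
    ("s1", "sen"),
    ("s1a", "sen"),
    ("s1b", "sen"),
    ("sen", "sen"),
    ("sent1", "sen"),
    ("sentinel1", "sen"),
    ("sentinel1a", "sen"),
    ("sentinel1b", "sen"),
    ("tandemx", "tsx"),
    ("tdx", "tsx"),
    ("terra", "tsx"),
    ("terrasar", "tsx"),
    ("terrasarx", "tsx"),
    ("tsx", "tsx"),
    ("uav", "uav"),
    ("uavsar", "uav") ]

-- ALIASES = [p[0] for p in PAIRS];  CANON = [p[1] for p in PAIRS]
def pvAliases : List String := pvPairs.map (·.1)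
def pvCanon : List String := pvPairs.map (·.2)

-- the while-loop binary search of Source B (lo, hi with mid = (lo+hi)//2)
def pvBsearch (name : String) (lo hi : Nat) : Nat :=
  if lo < hi then
    let mid := (lo + hi) / 2
    if pvAliases.getD mid "" < name then pvBsearch name (mid + 1) hi
    else pvBsearch name lo mid
  else lo
termination_by hi - lo
decreasing_by all_goals omega

def standardize_sensor_name_alt (sensor_name : String) : String :=
  let n := PySem.Str.lower (PySem.Str.replace (PySem.Str.replace sensor_name "-" "") "_" "")
  let lo := pvBsearch n 0 pvAliases.length
  if lo < pvAliases.length ∧ pvAliases.getD lo "" = n then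
    pvCanon.getD lo ""
  else
    n

-- ===== PRECONDITION & SPEC =====
def Spec_standardize_sensor_name (sensor_name : String) (out : String) : Prop := out = standardize_sensor_name_alt sensor_name
instance (sensor_name : String) (out : String) : Decidable (Spec_standardize_sensor_name sensor_name out) := by unfold Spec_standardize_sensor_name; infer_instance

-- ===== CLAIM (what is proved, stated in full; the proofs are below) =====
def Claim_equal_standardize_sensor_name : Prop := ∀ (sensor_name : String), Dom_standardize_sensor_name sensor_name → Spec_standardize_sensor_name sensor_name (standardize_sensor_name sensor_name)

-- ===== LEMMAS AND PROOFS =====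

-- A's core on a normalized name (the part after the shared normalization)
def pvACore (n : String) : String :=
  if n ∈ pvSensorNames then n
  else pvVariation.foldl (fun acc kv => if acc ∈ kv.2 then kv.1 else acc) n

-- the alias column is strictly increasing (finite check, on the char lists)
set_option maxRecDepth 40000 in
theorem pv_aliases_sorted : pvAliases.Pairwise (· < ·) := by
  have h : (pvAliases.map String.toList).Pairwise (· < ·) := by decide
  rw [List.pairwise_map] at h
  exact h.imp (fun hab => String.lt_iff_toList_lt.mpr hab)

-- every canonical key and every variation occurs in the alias column (finite check)
set_option maxRecDepth 40000 in
theorem pv_covered :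
    (pvSensorNames.all (· ∈ pvAliases)
      && pvVariation.all (fun kv => kv.2.all (· ∈ pvAliases))) = true := by decide

-- on each table row, A's core maps the alias to the canonical value (finite check)
set_option maxRecDepth 40000 in
theorem pv_rows : ∀ p ∈ pvPairs, pvACore p.1 = p.2 := by decide

theorem pv_foldl_id (l : List (String × List String)) (n : String)
    (h : ∀ kv ∈ l, n ∉ kv.2) :
    l.foldl (fun acc kv => if acc ∈ kv.2 then kv.1 else acc) n = n := by
  induction l with
  | nil => rfl
  | cons kv t ih =>
      simp only [List.foldl_cons, if_neg (h kv (by simp))]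
      exact ih (fun kv' h' => h kv' (by simp [h']))

-- A's core is the identity on names outside the table
theorem pv_acore_id (n : String) (h : n ∉ pvAliases) : pvACore n = n := by
  have hcov := pv_covered
  simp only [Bool.and_eq_true, List.all_eq_true, decide_eq_true_eq] at hcov
  have hnames : n ∉ pvSensorNames := fun hm => h (hcov.1 n hm)
  unfold pvACore
  rw [if_neg hnames]
  exact pv_foldl_id _ _ (fun kv hkv hm => h (hcov.2 kv hkv n hm))

-- the binary search finds the (unique) index of a present name
theorem pv_bsearch_finds (n : String) (k : Nat) (hk : k < pvAliases.length)
    (hn : pvAliases[k] = n) :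
    ∀ lo hi, lo ≤ k → k ≤ hi → hi ≤ pvAliases.length → pvBsearch n lo hi = k := by
  have hmono : ∀ i j (hi : i < pvAliases.length) (hj : j < pvAliases.length),
      i < j → pvAliases[i] < pvAliases[j] :=
    fun i j hi hj hij => (List.pairwise_iff_getElem.mp pv_aliases_sorted) i j hi hj hij
  intro lo hi
  induction hd : hi - lo using Nat.strong_induction_on generalizing lo hi with
  | _ d ih =>
    intro hlok hkhi hhiL
    rw [pvBsearch]
    by_cases hlt : lo < hi
    · rw [if_pos hlt]
      have hmidlt : (lo + hi) / 2 < hi := by omega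
      have hmidge : lo ≤ (lo + hi) / 2 := by omega
      have hmidL : (lo + hi) / 2 < pvAliases.length := by omega
      show (if pvAliases.getD ((lo + hi) / 2) "" < n
            then pvBsearch n ((lo + hi) / 2 + 1) hi
            else pvBsearch n lo ((lo + hi) / 2)) = k
      rw [List.getD_eq_getElem?_getD, List.getElem?_eq_getElem hmidL, Option.getD_some]
      by_cases hc : pvAliases[(lo + hi) / 2] < n
      · rw [if_pos hc]
        have hklt : (lo + hi) / 2 < k := by
          rcases Nat.lt_trichotomy ((lo + hi) / 2) k with h | h | h
          · exact h
          · exact absurd hc (by simp [h, hn])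
          · exact absurd (hn ▸ hmono k ((lo + hi) / 2) hk hmidL h)
              (fun hx => absurd (lt_trans hx hc) (lt_irrefl _))
        exact ih (hi - ((lo + hi) / 2 + 1)) (by omega) _ _ rfl (by omega) hkhi hhiL
      · rw [if_neg hc]
        have hkle : k ≤ (lo + hi) / 2 := by
          by_contra hx
          exact hc (hn ▸ hmono ((lo + hi) / 2) k hmidL hk (by omega))
        exact ih ((lo + hi) / 2 - lo) (by omega) _ _ rfl hlok hkle (by omega)
    · rw [if_neg hlt]; omega

-- the two cores agree on every normalized name
theorem pv_core_eq (n : String) :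
    pvACore n =
      (if pvBsearch n 0 pvAliases.length < pvAliases.length ∧
          pvAliases.getD (pvBsearch n 0 pvAliases.length) "" = n
       then pvCanon.getD (pvBsearch n 0 pvAliases.length) ""
       else n) := by
  by_cases hmem : n ∈ pvAliases
  · obtain ⟨k, hk, hkn⟩ := List.getElem_of_mem hmem
    have hkp : k < pvPairs.length := by
      simpa only [pvAliases, List.length_map] using hk
    rw [pv_bsearch_finds n k hk hkn 0 pvAliases.length (Nat.zero_le _) (Nat.le_of_lt hk) (le_refl _)]
    rw [if_pos ⟨hk, by
      rw [List.getD_eq_getElem?_getD, List.getElem?_eq_getElem hk, Option.getD_some, hkn]⟩]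
    have hkc : k < pvCanon.length := by
      simpa only [pvCanon, List.length_map] using hkp
    rw [List.getD_eq_getElem?_getD, List.getElem?_eq_getElem hkc, Option.getD_some]
    have hkn2 : (pvPairs[k]'hkp).1 = n := by
      simpa only [pvAliases, List.getElem_map] using hkn
    simp only [pvCanon, List.getElem_map]
    rw [← pv_rows (pvPairs[k]'hkp) (List.getElem_mem hkp), hkn2]
  · rw [pv_acore_id n hmem]
    by_cases hguard : pvBsearch n 0 pvAliases.length < pvAliases.length ∧
        pvAliases.getD (pvBsearch n 0 pvAliases.length) "" = n
    · exfalso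
      obtain ⟨hlt, heq⟩ := hguard
      apply hmem
      rw [← heq, List.getD_eq_getElem?_getD, List.getElem?_eq_getElem hlt, Option.getD_some]
      exact List.getElem_mem hlt
    · rw [if_neg hguard]

-- ===== VERDICT (by name: the statement is the Claim_ definition above) =====
theorem standardize_sensor_name_spec : Claim_equal_standardize_sensor_name := by
  intro s _
  unfold Spec_standardize_sensor_name standardize_sensor_name standardize_sensor_name_alt
  exact pv_core_eq _
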